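-- pv_equiv track=rewrite | github.com/jonathonreilly/toy-physics | scripts/lattice_nn_topological_causal_bound_check.py | dependency_supports
-- ===== SOURCE A (Python) =====
-- Vertex = int
--
-- def dependency_supports(
--     vertex_count: int, pred: list[set[Vertex]], horizon: int
-- ) -> list[list[set[Vertex]]]:
--     """deps[t][v] is the set of initial vertices that can affect v at tick t."""
--     deps = [[{v} for v in range(vertex_count)]]
--     for _ in range(horizon):
--         previous = deps[-1]
--         current = []
--         for v in range(vertex_count):
--             support = set()
--             for u in pred[v]:
--                 support.update(previous[u])
--             current.append(support)
--         deps.append(current)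
--     return deps
-- ===== SOURCE B (Python) =====
-- Vertex = int
--
-- def dependency_supports(
--     vertex_count: int, pred: list[set[Vertex]], horizon: int
-- ) -> list[list[set[Vertex]]]:
--     """deps[t][v] is the set of initial vertices that can affect v at tick t.
--
--     Per-source forward propagation: march a reachability frontier out of every
--     initial vertex through the edge relation (w -> v iff w in pred[v]) and
--     assemble each tick's row of support sets by membership in those frontiers.
--     """
--     deps = [[{v} for v in range(vertex_count)]]
--     frontiers = [{s} for s in range(vertex_count)]
--     for _ in range(horizon):
--         frontiers = [
--             {v for v in range(vertex_count) if not fr.isdisjoint(pred[v])}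
--             for fr in frontiers
--         ]
--         deps.append(
--             [{s for s in range(vertex_count) if v in frontiers[s]}
--              for v in range(vertex_count)]
--         )
--     return deps
-- ===== Notes on version B (the rewrite author's own statement) =====
-- stated objective: alternative
-- what changed: A pulls each deps[t][v] as the union of the previous tick's support sets over u in pred[v]; B instead marches a forward reachability frontier out of every source vertex through the transposed edge relation and assembles each tick's row of support sets by membership in those per-source frontiers.
-- outside the precondition, e.g. on dependency_supports(2, [{-1}, {0}], 1): A returns [[{0}, {1}], [{1}, {0}]], B returns [[{0}, {1}], [set(), {0}]]
import Mathlib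
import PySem

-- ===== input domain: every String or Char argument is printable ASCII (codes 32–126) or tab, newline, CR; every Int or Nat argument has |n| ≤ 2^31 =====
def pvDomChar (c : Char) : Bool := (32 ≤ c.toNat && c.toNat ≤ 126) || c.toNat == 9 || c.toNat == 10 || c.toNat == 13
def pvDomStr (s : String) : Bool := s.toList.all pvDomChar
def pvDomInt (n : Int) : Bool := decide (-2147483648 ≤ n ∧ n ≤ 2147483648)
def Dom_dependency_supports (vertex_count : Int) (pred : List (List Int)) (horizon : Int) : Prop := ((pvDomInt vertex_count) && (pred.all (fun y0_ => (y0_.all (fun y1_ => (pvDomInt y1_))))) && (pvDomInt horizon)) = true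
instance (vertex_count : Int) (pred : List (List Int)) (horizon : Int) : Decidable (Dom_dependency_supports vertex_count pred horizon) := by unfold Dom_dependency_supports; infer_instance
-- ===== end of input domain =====

-- B replaces A's per-(tick,vertex) union of predecessor support sets by per-source forward
-- frontier propagation with membership assembly of each row (objective: alternative).
-- Python sets carry no defined iteration/representation order, so both ports represent every
-- returned set by a canonical element list in increasing order (exact as a set).

-- ===== PORT A =====
-- support = set(); for u in pred[v]: support.update(previous[u])  — rendered canonically sorted
def pvRowStepA (n : Nat) (pred : List (List Int)) (previous : List (List Int)) : List (List Int) :=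
  (List.range n).map (fun (v : Nat) =>
    PySem.List.sorted
      ((PySem.List.pyGetD pred (v : Int) []).foldl
        (fun support u => PySem.Set.update support (PySem.List.pyGetD previous u []))
        PySem.Set.empty)
      (fun x => x))

def dependency_supports (vertex_count : Int) (pred : List (List Int)) (horizon : Int) : List (List (List Int)) :=
  -- deps = [[{v} for v in range(vertex_count)]]  (range(vc) = 0,…,vc-1; empty for vc ≤ 0)
  let base : List (List Int) := (List.range vertex_count.toNat).map (fun (v : Nat) => [(v : Int)])
  -- for _ in range(horizon): previous = deps[-1]; deps.append(current row)
  (PySem.List.pyRange 0 horizon 1).foldl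
    (fun deps _ =>
      deps ++ [pvRowStepA vertex_count.toNat pred (PySem.List.pyGetD deps (-1) [])])
    [base]

-- ===== PORT B =====
-- {v for v in range(n) if not fr.isdisjoint(pred[v])}  (canonical increasing order)
def pvFrontStep (n : Nat) (pred : List (List Int)) (fr : List Int) : List Int :=
  ((List.range n).filter
    (fun (v : Nat) => !(PySem.Set.isdisjoint fr (PySem.List.pyGetD pred (v : Int) [])))).map
    (fun (v : Nat) => (v : Int))

-- [{s for s in range(n) if v in frontiers[s]} for v in range(n)]
def pvAssemble (n : Nat) (frontiers : List (List Int)) : List (List Int) :=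
  (List.range n).map (fun (v : Nat) =>
    ((List.range n).filter
      (fun (s : Nat) => decide ((v : Int) ∈ PySem.List.pyGetD frontiers (s : Int) []))).map
      (fun (s : Nat) => (s : Int)))

def dependency_supports_alt (vertex_count : Int) (pred : List (List Int)) (horizon : Int) : List (List (List Int)) :=
  let n := vertex_count.toNat
  let base : List (List Int) := (List.range n).map (fun (v : Nat) => [(v : Int)])
  let init : List (List Int) := (List.range n).map (fun (s : Nat) => [(s : Int)])
  ((PySem.List.pyRange 0 horizon 1).foldl
    (fun (st : List (List (List Int)) × List (List Int)) _ =>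
      let frontiers' := st.2.map (pvFrontStep n pred)
      (st.1 ++ [pvAssemble n frontiers'], frontiers'))
    ([base], init)).1

-- ===== PRECONDITION & SPEC =====
-- Pre_ excludes the inputs where A raises IndexError (pred shorter than vertex_count, or an
-- entry u with u ≥ vertex_count or u < -vertex_count) and, deliberately, the inputs outside the
-- natural domain where an entry u of some pred[v] is negative: valid vertex ids are 0…vc-1, and
-- on those inputs A only returns via Python's accidental negative-index wraparound previous[u].
def Pre_dependency_supports (vertex_count : Int) (pred : List (List Int)) (horizon : Int) : Prop :=
  0 < horizon → 0 < vertex_count →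
    (vertex_count ≤ (pred.length : Int) ∧
      ∀ row ∈ pred.take vertex_count.toNat, ∀ u ∈ row, 0 ≤ u ∧ u < vertex_count)
instance (vertex_count : Int) (pred : List (List Int)) (horizon : Int) : Decidable (Pre_dependency_supports vertex_count pred horizon) := by unfold Pre_dependency_supports; infer_instance

def pvWitness_dependency_supports : Int × List (List Int) × Int := (2, ([[1], [0]], 1))

def Spec_dependency_supports (vertex_count : Int) (pred : List (List Int)) (horizon : Int) (out : List (List (List Int))) : Prop := out = dependency_supports_alt vertex_count pred horizon
instance (vertex_count : Int) (pred : List (List Int)) (horizon : Int) (out : List (List (List Int))) : Decidable (Spec_dependency_supports vertex_count pred horizon out) := by unfold Spec_dependency_supports; infer_instance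

-- ===== CLAIM (what is proved, stated in full; the proofs are below) =====
def Claim_equal_dependency_supports : Prop := ∀ (vertex_count : Int) (pred : List (List Int)) (horizon : Int), Dom_dependency_supports vertex_count pred horizon → Pre_dependency_supports vertex_count pred horizon → Spec_dependency_supports vertex_count pred horizon (dependency_supports vertex_count pred horizon)

-- ===== LEMMAS AND PROOFS =====

theorem pvAssemble_getD (n : Nat) (frs : List (List Int)) (v : Nat) (hv : v < n) :
    PySem.List.pyGetD (pvAssemble n frs) (v : Int) [] =
      ((List.range n).filter
        (fun (s : Nat) => decide ((v : Int) ∈ PySem.List.pyGetD frs (s : Int) []))).map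
        (fun (s : Nat) => (s : Int)) := by
  rw [PySem.List.pyGetD_natCast, pvAssemble, PySem.List.getD_map_range _ _ _ _ hv]

theorem pvMem_filter_map_range (n : Nat) (p : Nat → Bool) (x : Int) :
    (x ∈ ((List.range n).filter p).map (fun (s : Nat) => (s : Int)) ↔
      ∃ s : Nat, s < n ∧ p s = true ∧ x = (s : Int)) := by
  simp only [List.mem_map, List.mem_filter, List.mem_range]
  constructor
  · rintro ⟨s, ⟨hs, hp⟩, rfl⟩; exact ⟨s, hs, hp, rfl⟩
  · rintro ⟨s, hs, hp, rfl⟩; exact ⟨s, ⟨hs, hp⟩, rfl⟩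

theorem pvMem_foldl_update (l : List Int) (f : Int → List Int) (init : PySem.Set Int) (x : Int) :
    (x ∈ l.foldl (fun s u => PySem.Set.update s (f u)) init ↔ x ∈ init ∨ ∃ u ∈ l, x ∈ f u) := by
  induction l generalizing init with
  | nil => simp
  | cons a l ih =>
    simp only [List.foldl_cons, ih, PySem.Set.mem_update, List.mem_cons]
    constructor
    · rintro ((h | h) | ⟨u, hu, hx⟩)
      · exact Or.inl h
      · exact Or.inr ⟨a, Or.inl rfl, h⟩
      · exact Or.inr ⟨u, Or.inr hu, hx⟩
    · rintro (h | ⟨u, (rfl | hu), hx⟩)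
      · exact Or.inl (Or.inl h)
      · exact Or.inl (Or.inr hx)
      · exact Or.inr ⟨u, hu, hx⟩

theorem pvNodup_foldl_update (l : List Int) (f : Int → List Int) (init : PySem.Set Int)
    (hinit : List.Nodup init) :
    List.Nodup (l.foldl (fun s u => PySem.Set.update s (f u)) init) := by
  induction l generalizing init with
  | nil => simpa using hinit
  | cons a l ih => exact ih _ (PySem.Set.nodup_update _ _ hinit)

-- membership in the stepped frontier of source s
theorem pvMem_frontStep (n : Nat) (pred : List (List Int)) (frs : List (List Int))
    (s v : Nat) (hv : v < n) :
    ((v : Int) ∈ (frs.map (pvFrontStep n pred)).getD s [] ↔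
      ∃ w ∈ frs.getD s [], w ∈ PySem.List.pyGetD pred (v : Int) []) := by
  by_cases hs : s < frs.length
  · rw [List.getD_eq_getElem _ _ (by simpa using hs), List.getElem_map,
      List.getD_eq_getElem _ _ hs]
    rw [pvFrontStep, pvMem_filter_map_range]
    constructor
    · rintro ⟨v', hv', hp, hcast⟩
      have hveq : v' = v := by exact_mod_cast hcast.symm
      subst hveq
      rw [Bool.not_eq_true'] at hp
      by_contra hno
      push Not at hno
      have hdis : PySem.Set.isdisjoint (frs[s]) (PySem.List.pyGetD pred (v' : Int) []) = true :=
        (PySem.Set.isdisjoint_iff _ _).2 hno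
      rw [hdis] at hp; simp at hp
    · rintro ⟨w, hw, hmem⟩
      refine ⟨v, hv, ?_, rfl⟩
      rw [Bool.not_eq_true']
      by_contra hdis
      rw [Bool.not_eq_false] at hdis
      exact (PySem.Set.isdisjoint_iff _ _).1 hdis w hw hmem
  · rw [List.getD_eq_default _ _ (by simpa using Nat.le_of_not_lt hs),
      List.getD_eq_default _ _ (Nat.le_of_not_lt hs)]
    simp

-- the core step: one tick of A on an assembled row equals the assembly of the stepped frontiers
theorem pvRowStepA_assemble (n : Nat) (pred : List (List Int)) (frs : List (List Int))
    (hpred : ∀ v : Nat, v < n → ∀ u ∈ PySem.List.pyGetD pred (v : Int) [], 0 ≤ u ∧ u < (n : Int)) :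
    pvRowStepA n pred (pvAssemble n frs) = pvAssemble n (frs.map (pvFrontStep n pred)) := by
  rw [pvRowStepA]
  conv_rhs => rw [pvAssemble]
  refine List.map_congr_left ?_
  intro v hvr
  have hv : v < n := List.mem_range.1 hvr
  apply PySem.List.sorted_eq_of_perm_of_pairwise_lt
  · -- the two sides are nodup lists with the same membership, hence permutations
    refine (List.perm_ext_iff_of_nodup ?_ ?_).2 ?_
    · exact List.Nodup.map (fun a b h => by exact_mod_cast h)
        (List.Nodup.filter _ (List.nodup_range))
    · exact pvNodup_foldl_update _ _ _ List.nodup_nil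
    · intro x
      rw [pvMem_foldl_update, pvMem_filter_map_range]
      simp only [PySem.Set.empty, List.not_mem_nil, false_or]
      constructor
      · rintro ⟨s, hs, hmem, rfl⟩
        rw [decide_eq_true_iff, PySem.List.pyGetD_natCast,
          pvMem_frontStep n pred frs s v hv] at hmem
        obtain ⟨w, hw, hwp⟩ := hmem
        obtain ⟨hw0, hwn⟩ := hpred v hv w hwp
        refine ⟨w, hwp, ?_⟩
        have hcast : ((w.toNat : Nat) : Int) = w := Int.toNat_of_nonneg hw0
        have hwn' : w.toNat < n := by omega
        rw [← hcast, pvAssemble_getD n frs w.toNat hwn', pvMem_filter_map_range]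
        refine ⟨s, hs, ?_, rfl⟩
        rw [decide_eq_true_iff, PySem.List.pyGetD_natCast, hcast]
        exact hw
      · rintro ⟨u, hu, hx⟩
        obtain ⟨hu0, hun⟩ := hpred v hv u hu
        have hcast : ((u.toNat : Nat) : Int) = u := Int.toNat_of_nonneg hu0
        have hun' : u.toNat < n := by omega
        rw [← hcast, pvAssemble_getD n frs u.toNat hun', pvMem_filter_map_range] at hx
        obtain ⟨s, hs, hmem, rfl⟩ := hx
        rw [decide_eq_true_iff, PySem.List.pyGetD_natCast, hcast] at hmem
        refine ⟨s, hs, ?_, rfl⟩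
        rw [decide_eq_true_iff, PySem.List.pyGetD_natCast,
          pvMem_frontStep n pred frs s v hv]
        exact ⟨u, hmem, hu⟩
  · -- strictly increasing: a filtered range mapped through the (strictly monotone) cast
    exact List.Pairwise.map _ (fun a b h => by exact_mod_cast h)
      (List.Pairwise.filter _ List.pairwise_lt_range)

-- the base row is the assembly of the initial frontiers
theorem pvBase_assemble (n : Nat) :
    (List.range n).map (fun (v : Nat) => [(v : Int)]) =
      pvAssemble n ((List.range n).map (fun (s : Nat) => [(s : Int)])) := by
  unfold pvAssemble
  refine List.map_congr_left ?_
  intro v hvr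
  have hv : v < n := List.mem_range.1 hvr
  have hcongr : ∀ s ∈ List.range n,
      (decide ((v : Int) ∈
        PySem.List.pyGetD ((List.range n).map (fun (s : Nat) => [(s : Int)])) (s : Int) []))
        = (s == v) := by
    intro s hsr
    have hs : s < n := List.mem_range.1 hsr
    rw [PySem.List.pyGetD_natCast, PySem.List.getD_map_range _ _ _ _ hs]
    simp only [List.mem_singleton]
    rcases eq_or_ne s v with rfl | h
    · simp
    · have hne : ((v : Int)) ≠ ((s : Int)) := fun hc => h (by exact_mod_cast hc.symm)
      simp [hne, h]
  rw [List.filter_congr hcongr, List.filter_beq]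
  have h1 : List.count v (List.range n) = 1 :=
    List.count_eq_one_of_mem List.nodup_range (by simp [hv])
  rw [h1]; rfl

-- the fold invariant: A's table equals B's table component, B's frontiers assemble A's last row
theorem pvFold_inv (n : Nat) (pred : List (List Int))
    (hpred : ∀ v : Nat, v < n → ∀ u ∈ PySem.List.pyGetD pred (v : Int) [], 0 ≤ u ∧ u < (n : Int))
    (L : List Int) :
    ∀ (dA : List (List (List Int))) (frs : List (List Int)),
      PySem.List.pyGetD dA (-1) [] = pvAssemble n frs →
      L.foldl (fun deps _ => deps ++ [pvRowStepA n pred (PySem.List.pyGetD deps (-1) [])]) dA =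
        (L.foldl
          (fun (st : List (List (List Int)) × List (List Int)) _ =>
            let frontiers' := st.2.map (pvFrontStep n pred)
            (st.1 ++ [pvAssemble n frontiers'], frontiers'))
          (dA, frs)).1 := by
  induction L with
  | nil => intro dA frs _; rfl
  | cons a L ih =>
    intro dA frs hlast
    simp only [List.foldl_cons]
    rw [hlast, pvRowStepA_assemble n pred frs hpred]
    exact ih (dA ++ [pvAssemble n (frs.map (pvFrontStep n pred))]) (frs.map (pvFrontStep n pred))
      (PySem.List.pyGetD_neg_one_append_singleton _ _ _)

-- ===== VERDICT (by name: the statement is the Claim_ definition above) =====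
theorem dependency_supports_spec : Claim_equal_dependency_supports := by
  intro vc pred horizon _hdom hpre
  unfold Spec_dependency_supports dependency_supports dependency_supports_alt
  by_cases hh : 0 < horizon
  · have hpred : ∀ v : Nat, v < vc.toNat →
        ∀ u ∈ PySem.List.pyGetD pred (v : Int) [], 0 ≤ u ∧ u < ((vc.toNat : Nat) : Int) := by
      intro v hv u hu
      have hvc : 0 < vc := by omega
      obtain ⟨hlen, hall⟩ := hpre hh hvc
      have hvlen : v < pred.length := by omega
      rw [PySem.List.pyGetD_natCast, List.getD_eq_getElem _ _ hvlen] at hu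
      have hmem : pred[v] ∈ pred.take vc.toNat := by
        have hgt : (pred.take vc.toNat)[v]'(by simp; omega) = pred[v] := List.getElem_take
        exact hgt ▸ List.getElem_mem _
      have := hall _ hmem u hu
      omega
    exact pvFold_inv vc.toNat pred hpred (PySem.List.pyRange 0 horizon 1) _ _
      ((PySem.List.pyGetD_neg_one_append_singleton ([] : List (List (List Int))) _ _).trans
        (pvBase_assemble vc.toNat))
  · have hnil : PySem.List.pyRange 0 horizon 1 = [] := by
      rw [List.eq_nil_iff_forall_not_mem]
      intro x hx
      rw [PySem.List.mem_pyRange_one] at hx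
      omega
    rw [hnil]
    rfl
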